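-- pv_equiv track=rewrite | github.com/yoon570/chet_vis | hybrid_approach_literal_escape.py | adjusted_sequence_frequencies
-- ===== SOURCE A (Python) =====
-- from collections import defaultdict, Counter
--
-- def adjusted_sequence_frequencies(page, n, literal_escape):
--     sequences = defaultdict(list)
--     for i in range(len(page) - n + 1):
--         current_seq = tuple(page[i : i + n])
--         if i > 0 and page[i - 1] == literal_escape:
--             continue
--         if current_seq[-1] == literal_escape:
--             continue
--         if current_seq in sequences and sequences[current_seq][-1] + n > i:
--             # overlaps
--             continue
--         sequences[current_seq].append(i)
--     sequences = [(seq, len(freq)) for seq, freq in sequences.items()]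
--     return sequences
-- ===== SOURCE B (Python) =====
-- def adjusted_sequence_frequencies(page, n, literal_escape):
--     # Pass 1: collect ALL escape-valid start positions, grouped by n-gram.
--     positions = {}
--     for i in range(len(page) - n + 1):
--         if i > 0 and page[i - 1] == literal_escape:
--             continue
--         if page[i + n - 1] == literal_escape:
--             continue
--         positions.setdefault(tuple(page[i:i + n]), []).append(i)
--     # Pass 2: per n-gram, greedily count non-overlapping occurrences.
--     result = []
--     for seq, pos_list in positions.items():
--         count = 0
--         last = None
--         for p in pos_list:
--             if last is None or last + n <= p:
--                 count += 1
--                 last = p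
--         result.append((seq, count))
--     return result
-- ===== Notes on version B (the rewrite author's own statement) =====
-- stated objective: alternative
-- what changed: A interleaves escape filtering and overlap suppression in one stateful dict-building loop; B first collects ALL escape-valid start positions per n-gram (checking page[i+n-1] directly instead of slicing first), then in a second pass greedily counts non-overlapping occurrences per n-gram with a (count, last) accumulator.
import Mathlib
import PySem

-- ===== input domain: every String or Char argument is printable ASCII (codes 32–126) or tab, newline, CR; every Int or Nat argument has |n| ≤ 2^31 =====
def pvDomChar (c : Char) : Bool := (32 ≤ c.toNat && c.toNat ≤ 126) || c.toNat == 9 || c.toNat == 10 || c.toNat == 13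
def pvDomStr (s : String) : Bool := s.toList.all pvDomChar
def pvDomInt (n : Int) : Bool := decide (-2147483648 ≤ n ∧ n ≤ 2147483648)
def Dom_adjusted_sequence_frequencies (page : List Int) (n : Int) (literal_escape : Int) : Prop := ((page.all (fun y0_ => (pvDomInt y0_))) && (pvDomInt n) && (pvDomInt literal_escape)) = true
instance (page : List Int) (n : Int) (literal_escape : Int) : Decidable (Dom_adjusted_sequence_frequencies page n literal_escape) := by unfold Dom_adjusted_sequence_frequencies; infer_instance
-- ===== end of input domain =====

-- B splits A's single stateful loop into two passes: collect all escape-valid positions per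
-- n-gram, then greedily count non-overlapping ones per n-gram (objective: alternative decomposition).


-- ===== PORT A =====
-- sequences[current_seq][-1] is ported with pyGetD (..) (-1) 0: exact because every stored list is
-- nonempty (values are only ever created as [i] and appended to).
def adjusted_sequence_frequencies (page : List Int) (n : Int) (literal_escape : Int) : List (List Int × Int) :=
  ((PySem.List.pyRange 0 (PySem.List.len page - n + 1) 1).foldl
      (fun (d : PySem.Dict (List Int) (List Int)) i =>
        let current_seq := PySem.List.slice page (some i) (some (i + n))
        if 0 < i ∧ PySem.List.pyGet? page (i - 1) = some literal_escape then d
        else if PySem.List.pyGet? current_seq (-1) = some literal_escape then d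
        else
          match d.get? current_seq with
          | some freq =>
              if PySem.List.pyGetD freq (-1) 0 + n > i then d
              else d.insert current_seq (freq ++ [i])
          | none => d.insert current_seq [i])
      PySem.Dict.empty).items.map (fun p => (p.1, PySem.List.len p.2))

-- ===== PORT B =====
-- state of B's inner greedy loop: (count, last accepted position or None)
def pvGreedyStep (n : Int) (st : Int × Option Int) (p : Int) : Int × Option Int :=
  match st.2 with
  | none => (st.1 + 1, some p)
  | some last => if last + n ≤ p then (st.1 + 1, some p) else st

def adjusted_sequence_frequencies_alt (page : List Int) (n : Int) (literal_escape : Int) : List (List Int × Int) :=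
  ((PySem.List.pyRange 0 (PySem.List.len page - n + 1) 1).foldl
      (fun (d : PySem.Dict (List Int) (List Int)) i =>
        if 0 < i ∧ PySem.List.pyGet? page (i - 1) = some literal_escape then d
        else if PySem.List.pyGet? page (i + n - 1) = some literal_escape then d
        else
          let k := PySem.List.slice page (some i) (some (i + n))
          d.insert k (d.getD k [] ++ [i]))
      PySem.Dict.empty).items.map (fun p => (p.1, (p.2.foldl (pvGreedyStep n) (0, none)).1))

-- ===== PRECONDITION & SPEC =====
-- For every n ≤ 0 the Python A raises IndexError (current_seq[-1] on an empty slice), so Pre_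
-- excludes exactly the raising inputs and nothing A returns on.
def Pre_adjusted_sequence_frequencies (page : List Int) (n : Int) (literal_escape : Int) : Prop := 1 ≤ n
instance (page : List Int) (n : Int) (literal_escape : Int) : Decidable (Pre_adjusted_sequence_frequencies page n literal_escape) := by unfold Pre_adjusted_sequence_frequencies; infer_instance

def pvWitness_adjusted_sequence_frequencies : List Int × Int × Int := ([1, 2, 1, 2, 1, 2], 2, 9)

def Spec_adjusted_sequence_frequencies (page : List Int) (n : Int) (literal_escape : Int) (out : List (List Int × Int)) : Prop := out = adjusted_sequence_frequencies_alt page n literal_escape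
instance (page : List Int) (n : Int) (literal_escape : Int) (out : List (List Int × Int)) : Decidable (Spec_adjusted_sequence_frequencies page n literal_escape out) := by unfold Spec_adjusted_sequence_frequencies; infer_instance

-- ===== CLAIM (what is proved, stated in full; the proofs are below) =====
def Claim_equal_adjusted_sequence_frequencies : Prop := ∀ (page : List Int) (n : Int) (literal_escape : Int), Dom_adjusted_sequence_frequencies page n literal_escape → Pre_adjusted_sequence_frequencies page n literal_escape → Spec_adjusted_sequence_frequencies page n literal_escape (adjusted_sequence_frequencies page n literal_escape)

-- ===== LEMMAS AND PROOFS =====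

-- the greedily ACCEPTED positions (the list A's dict actually stores for a key whose
-- escape-valid positions are vs)
def gstep (n : Int) (acc : List Int) (p : Int) : List Int :=
  match acc.getLast? with
  | none => acc ++ [p]
  | some last => if last + n ≤ p then acc ++ [p] else acc

def gsel (n : Int) (vs : List Int) : List Int := vs.foldl (gstep n) []

lemma gstep_ne_nil (n : Int) (acc : List Int) (p : Int) : gstep n acc p ≠ [] := by
  cases h : acc.getLast? with
  | none => simp [gstep, h]
  | some last =>
    have hacc : acc ≠ [] := by intro hn; simp [hn] at h
    simp only [gstep, h]
    split <;> simp [hacc]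

lemma foldl_gstep_ne_nil (n : Int) : ∀ (vs acc : List Int), acc ≠ [] → vs.foldl (gstep n) acc ≠ [] := by
  intro vs
  induction vs with
  | nil => intro acc h; simpa using h
  | cons p vs ih => intro acc _; exact ih (gstep n acc p) (gstep_ne_nil n acc p)

lemma gsel_ne_nil (n : Int) (vs : List Int) (h : vs ≠ []) : gsel n vs ≠ [] := by
  cases vs with
  | nil => exact absurd rfl h
  | cons p vs =>
    show (List.foldl (gstep n) [] (p :: vs)) ≠ []
    rw [List.foldl_cons]
    exact foldl_gstep_ne_nil n vs _ (gstep_ne_nil n [] p)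

lemma gsel_concat (n : Int) (vs : List Int) (i : Int) :
    gsel n (vs ++ [i]) = gstep n (gsel n vs) i := by
  unfold gsel; rw [List.foldl_append]; rfl

-- B's (count, last) fold computes the length and last element of the accepted list
lemma greedy_fold (n : Int) : ∀ (vs acc : List Int),
    vs.foldl (pvGreedyStep n) ((acc.length : Int), acc.getLast?)
      = (((vs.foldl (gstep n) acc).length : Int), (vs.foldl (gstep n) acc).getLast?) := by
  intro vs
  induction vs with
  | nil => intro acc; rfl
  | cons p vs ih =>
    intro acc
    rw [List.foldl_cons, List.foldl_cons]
    cases h : acc.getLast? with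
    | none =>
      have hstep : pvGreedyStep n ((acc.length : Int), none) p
          = (((acc ++ [p]).length : Int), (acc ++ [p]).getLast?) := by
        simp [pvGreedyStep]
      have hg : gstep n acc p = acc ++ [p] := by simp [gstep, h]
      rw [hstep, hg, ih (acc ++ [p])]
    | some last =>
      by_cases hc : last + n ≤ p
      · have hstep : pvGreedyStep n ((acc.length : Int), some last) p
            = (((acc ++ [p]).length : Int), (acc ++ [p]).getLast?) := by
          simp [pvGreedyStep, hc]
        have hg : gstep n acc p = acc ++ [p] := by simp [gstep, h, hc]
        rw [hstep, hg, ih (acc ++ [p])]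
      · have hstep : pvGreedyStep n ((acc.length : Int), some last) p
            = ((acc.length : Int), acc.getLast?) := by
          simp [pvGreedyStep, hc, h]
        have hg : gstep n acc p = acc := by simp [gstep, h, hc]
        rw [hstep, hg, ih acc]

lemma greedy_count (n : Int) (vs : List Int) :
    (vs.foldl (pvGreedyStep n) (0, none)).1 = ((gsel n vs).length : Int) := by
  have := greedy_fold n vs []
  simpa [gsel] using congrArg Prod.fst this

-- lookup through a value-mapped items list
lemma get?_mk_map (f : List Int → List Int) : ∀ (its : List (List Int × List Int)) (k : List Int),
    (PySem.Dict.mk (its.map (fun p => (p.1, f p.2)))).get? k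
      = ((PySem.Dict.mk its).get? k).map f := by
  intro its
  induction its with
  | nil => intro k; rfl
  | cons p rest ih =>
    intro k
    obtain ⟨a, b⟩ := p
    rw [List.map_cons]
    rw [PySem.Dict.get?_mk_cons, PySem.Dict.get?_mk_cons]
    by_cases hab : (a == k) = true
    · simp [hab]
    · rw [if_neg hab, if_neg hab, ih]

-- A's escape test on the slice equals B's test on the page
lemma lastGuard (page : List Int) (n i : Int) (hn : 1 ≤ n) (h0 : 0 ≤ i)
    (h1 : i + n ≤ (page.length : Int)) :
    PySem.List.pyGet? (PySem.List.slice page (some i) (some (i + n))) (-1)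
      = PySem.List.pyGet? page (i + n - 1) := by
  obtain ⟨a, rfl⟩ : ∃ a : Nat, i = (a : Int) := ⟨i.toNat, (Int.toNat_of_nonneg h0).symm⟩
  obtain ⟨m, rfl⟩ : ∃ m : Nat, n = (m : Int) := ⟨n.toNat, (Int.toNat_of_nonneg (by omega)).symm⟩
  have hm : 1 ≤ m := by exact_mod_cast hn
  have ham : a + m ≤ page.length := by exact_mod_cast h1
  have hcast : (a : Int) + (m : Int) = ((a + m : Nat) : Int) := by push_cast; ring
  rw [hcast, PySem.List.slice_natCast, PySem.List.pyGet?_neg_one]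
  have hlen : ((page.drop a).take (a + m - a)).length = m := by
    simp [List.length_take, List.length_drop]; omega
  have hcast2 : ((a + m : Nat) : Int) - 1 = ((a + m - 1 : Nat) : Int) := by push_cast [hm]; omega
  rw [hcast2, PySem.List.pyGet?_natCast]
  rw [List.getLast?_eq_getElem?, hlen]
  have hsub : a + m - a = m := by omega
  rw [hsub, List.getElem?_take_of_lt (by omega), List.getElem?_drop]
  congr 1
  omega

-- the loop invariant: A's dict is B's dict with every value replaced by its accepted sublist
lemma main_inv (page : List Int) (n literal_escape : Int) (hn : 1 ≤ n) :
    ∀ (l : List Int) (dA dB : PySem.Dict (List Int) (List Int)),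
      (∀ i ∈ l, 0 ≤ i ∧ i + n ≤ (page.length : Int)) →
      dB.keys.Nodup →
      (∀ p ∈ dB.items, p.2 ≠ []) →
      dA = PySem.Dict.mk (dB.items.map (fun p => (p.1, gsel n p.2))) →
      (l.foldl
          (fun (d : PySem.Dict (List Int) (List Int)) i =>
            let current_seq := PySem.List.slice page (some i) (some (i + n))
            if 0 < i ∧ PySem.List.pyGet? page (i - 1) = some literal_escape then d
            else if PySem.List.pyGet? current_seq (-1) = some literal_escape then d
            else
              match d.get? current_seq with
              | some freq =>
                  if PySem.List.pyGetD freq (-1) 0 + n > i then d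
                  else d.insert current_seq (freq ++ [i])
              | none => d.insert current_seq [i]) dA)
        = PySem.Dict.mk ((l.foldl
            (fun (d : PySem.Dict (List Int) (List Int)) i =>
              if 0 < i ∧ PySem.List.pyGet? page (i - 1) = some literal_escape then d
              else if PySem.List.pyGet? page (i + n - 1) = some literal_escape then d
              else
                let k := PySem.List.slice page (some i) (some (i + n))
                d.insert k (d.getD k [] ++ [i])) dB).items.map (fun p => (p.1, gsel n p.2)))
      ∧ (l.foldl
            (fun (d : PySem.Dict (List Int) (List Int)) i =>
              if 0 < i ∧ PySem.List.pyGet? page (i - 1) = some literal_escape then d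
              else if PySem.List.pyGet? page (i + n - 1) = some literal_escape then d
              else
                let k := PySem.List.slice page (some i) (some (i + n))
                d.insert k (d.getD k [] ++ [i])) dB).keys.Nodup
      ∧ (∀ p ∈ (l.foldl
            (fun (d : PySem.Dict (List Int) (List Int)) i =>
              if 0 < i ∧ PySem.List.pyGet? page (i - 1) = some literal_escape then d
              else if PySem.List.pyGet? page (i + n - 1) = some literal_escape then d
              else
                let k := PySem.List.slice page (some i) (some (i + n))
                d.insert k (d.getD k [] ++ [i])) dB).items, p.2 ≠ []) := by
  intro l
  induction l with
  | nil =>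
    intro dA dB _ hnd hne hdA
    exact ⟨hdA, hnd, hne⟩
  | cons i l ih =>
    intro dA dB hmem hnd hne hdA
    have hi := hmem i (List.mem_cons_self ..)
    have hmem' : ∀ j ∈ l, 0 ≤ j ∧ j + n ≤ (page.length : Int) :=
      fun j hj => hmem j (List.mem_cons_of_mem _ hj)
    rw [List.foldl_cons, List.foldl_cons]
    set seq := PySem.List.slice page (some i) (some (i + n)) with hseq
    have hget : dA.get? seq = (dB.get? seq).map (gsel n) := by
      rw [hdA, get?_mk_map]
    by_cases g1 : 0 < i ∧ PySem.List.pyGet? page (i - 1) = some literal_escape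
    · simp only [g1]
      exact ih dA dB hmem' hnd hne hdA
    · simp only [g1, if_false]
      rw [lastGuard page n i hn hi.1 hi.2]
      by_cases g2 : PySem.List.pyGet? page (i + n - 1) = some literal_escape
      · simp only [g2, if_true]
        exact ih dA dB hmem' hnd hne hdA
      · simp only [g2, if_false]
        cases hB : dB.get? seq with
        | none =>
          have hA : dA.get? seq = none := by rw [hget, hB]; rfl
          have hcB : dB.contains seq = false := (PySem.Dict.get?_eq_none_iff_contains dB seq).mp hB
          have hcA : dA.contains seq = false := (PySem.Dict.get?_eq_none_iff_contains dA seq).mp hA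
          have hgetD : dB.getD seq [] = [] := PySem.Dict.getD_of_not_contains dB [] hcB
          simp only [hA, hgetD]
          apply ih
          · exact hmem'
          · exact PySem.Dict.nodup_keys_insert dB seq _ hnd
          · intro p hp
            rcases (PySem.Dict.mem_items_insert dB seq _ p).mp hp with h | h
            · subst h; simp
            · exact hne p h.1
          · apply PySem.Dict.ext
            rw [PySem.Dict.items_insert_of_not_contains dA _ hcA,
                PySem.Dict.items_insert_of_not_contains dB _ hcB]
            rw [hdA]
            simp [gsel, gstep]
        | some vs =>
          have hvs : vs ≠ [] := hne (seq, vs) (PySem.Dict.mem_items_of_get?_eq_some dB hB)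
          have hA : dA.get? seq = some (gsel n vs) := by rw [hget, hB]; rfl
          have hfreq : gsel n vs ≠ [] := gsel_ne_nil n vs hvs
          have hcB : dB.contains seq = true := by
            rw [PySem.Dict.contains_eq_isSome_get?, hB]; rfl
          have hcA : dA.contains seq = true := by
            rw [PySem.Dict.contains_eq_isSome_get?, hA]; rfl
          have hgetD : dB.getD seq [] = vs := PySem.Dict.getD_of_get?_eq_some dB [] hB
          have hlastD : PySem.List.pyGetD (gsel n vs) (-1) 0 = (gsel n vs).getLast hfreq :=
            PySem.List.pyGetD_neg_one _ 0 hfreq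
          have hlast? : (gsel n vs).getLast? = some ((gsel n vs).getLast hfreq) :=
            List.getLast?_eq_some_getLast hfreq
          have hnodupB' : (dB.insert seq (vs ++ [i])).keys.Nodup :=
            PySem.Dict.nodup_keys_insert dB seq _ hnd
          have hneB' : ∀ p ∈ (dB.insert seq (vs ++ [i])).items, p.2 ≠ [] := by
            intro p hp
            rcases (PySem.Dict.mem_items_insert dB seq _ p).mp hp with h | h
            · subst h; simp
            · exact hne p h.1
          simp only [hA, hgetD]
          by_cases hov : PySem.List.pyGetD (gsel n vs) (-1) 0 + n > i
          · -- overlap: A skips, B records the position but the accepted sublist is unchanged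
            simp only [hov, if_true]
            apply ih _ _ hmem' hnodupB' hneB'
            rw [hdA]
            congr 1
            rw [PySem.Dict.items_insert_of_contains dB _ hcB]
            rw [List.map_map]
            apply List.map_congr_left
            intro p hp
            by_cases hpk : (p.1 == seq) = true
            · have hpkeq : p.1 = seq := by simpa using hpk
              have : dB.get? p.1 = some p.2 := PySem.Dict.get?_of_mem_items dB hp hnd
              rw [hpkeq, hB] at this
              have hpv : p.2 = vs := by injection this with h; exact h.symm
              have hg : gsel n (vs ++ [i]) = gsel n vs := by
                rw [gsel_concat, gstep, hlast?]
                simp only []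
                rw [if_neg (by rw [hlastD] at hov; omega)]
              simp only [Function.comp_apply, hpk, if_true]
              rw [hg, ← hpkeq, ← hpv]
            · simp only [Function.comp_apply, hpk]
              rw [if_neg (by simp)]
          · -- no overlap: both append
            simp only [hov, if_false]
            apply ih _ _ hmem' hnodupB' hneB'
            apply PySem.Dict.ext
            rw [PySem.Dict.items_insert_of_contains dA _ hcA,
                PySem.Dict.items_insert_of_contains dB _ hcB]
            rw [hdA]
            simp only [List.map_map]
            apply List.map_congr_left
            intro p hp
            have hg : gsel n (vs ++ [i]) = gsel n vs ++ [i] := by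
              rw [gsel_concat, gstep, hlast?]
              simp only []
              rw [if_pos (by rw [hlastD] at hov; omega)]
            by_cases hpk : (p.1 == seq) = true
            · simp only [Function.comp_apply, hpk, if_true, hg]
            · simp only [Function.comp_apply, hpk]
              rw [if_neg (by simp), if_neg (by simp)]

-- ===== VERDICT (by name: the statement is the Claim_ definition above) =====
theorem adjusted_sequence_frequencies_spec : Claim_equal_adjusted_sequence_frequencies := by
  intro page n literal_escape _ hn
  unfold Spec_adjusted_sequence_frequencies
  unfold adjusted_sequence_frequencies adjusted_sequence_frequencies_alt
  have hmem : ∀ i ∈ PySem.List.pyRange 0 (PySem.List.len page - n + 1) 1,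
      0 ≤ i ∧ i + n ≤ (page.length : Int) := by
    intro i hi
    rw [PySem.List.len_eq] at hi
    have := PySem.List.mem_pyRange_one.mp hi
    omega
  have hinv := main_inv page n literal_escape hn
    (PySem.List.pyRange 0 (PySem.List.len page - n + 1) 1)
    PySem.Dict.empty PySem.Dict.empty hmem (by simp)
    (by intro p hp; simp [PySem.Dict.empty] at hp) (by rfl)
  simp only []
  rw [hinv.1]
  rw [List.map_map]
  apply List.map_congr_left
  intro p _
  simp only [Function.comp_apply]
  rw [greedy_count, PySem.List.len_eq]
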